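-- pv_equiv track=rewrite | github.com/roctbb/ai-game-engine | games/ice_slide/engine.py | _can_reach_exit
-- ===== SOURCE A (Python) =====
-- _WIDTH = 12
--
-- _HEIGHT = 12
--
-- _START = (1, 1)
--
-- _EXIT = (10, 10)
--
-- _DELTAS = {
--     "up": (0, -1),
--     "down": (0, 1),
--     "left": (-1, 0),
--     "right": (1, 0),
-- }
--
-- def _can_reach_exit(walls: set[tuple[int, int]]) -> bool:
--     queue = [_START]
--     seen = {_START}
--     head = 0
--     while head < len(queue):
--         current = queue[head]
--         head += 1
--         if current == _EXIT:
--             return True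
--         for action in _DELTAS:
--             nxt = _slide(current, action, walls)
--             if nxt != current and nxt not in seen:
--                 seen.add(nxt)
--                 queue.append(nxt)
--     return False
--
-- def _slide(position: tuple[int, int], action: str, walls: set[tuple[int, int]]) -> tuple[int, int]:
--     dx, dy = _DELTAS[action]
--     x, y = position
--     while True:
--         nx, ny = x + dx, y + dy
--         if (nx, ny) in walls or not (0 <= nx < _WIDTH and 0 <= ny < _HEIGHT):
--             return x, y
--         x, y = nx, ny
--         if (x, y) == _EXIT:
--             return x, y
-- ===== SOURCE B (Python) =====
-- _WIDTH = 12
--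
-- _HEIGHT = 12
--
-- _START = (1, 1)
--
-- _EXIT = (10, 10)
--
-- _DELTAS = {
--     "up": (0, -1),
--     "down": (0, 1),
--     "left": (-1, 0),
--     "right": (1, 0),
-- }
--
-- def _can_reach_exit(walls: set[tuple[int, int]]) -> bool:
--     seen = {_START}
--
--     def reach(cell):
--         if cell == _EXIT:
--             return True
--         for action in _DELTAS:
--             nxt = _slide(cell, action, walls)
--             if nxt != cell and nxt not in seen:
--                 seen.add(nxt)
--                 if reach(nxt):
--                     return True
--         return False
--
--     return reach(_START)
--
-- def _slide(position: tuple[int, int], action: str, walls: set[tuple[int, int]]) -> tuple[int, int]: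
--     dx, dy = _DELTAS[action]
--     x, y = position
--     while True:
--         nx, ny = x + dx, y + dy
--         if (nx, ny) in walls or not (0 <= nx < _WIDTH and 0 <= ny < _HEIGHT):
--             return x, y
--         x, y = nx, ny
--         if (x, y) == _EXIT:
--             return x, y
-- ===== Notes on version B (the rewrite author's own statement) =====
-- stated objective: alternative
-- what changed: The explicit FIFO queue/head-pointer BFS loop is replaced by a recursive depth-first flood fill (a nested closure mutating one shared seen set), which computes the same reachability boolean with no queue and no loop over it.
import Mathlib
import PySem

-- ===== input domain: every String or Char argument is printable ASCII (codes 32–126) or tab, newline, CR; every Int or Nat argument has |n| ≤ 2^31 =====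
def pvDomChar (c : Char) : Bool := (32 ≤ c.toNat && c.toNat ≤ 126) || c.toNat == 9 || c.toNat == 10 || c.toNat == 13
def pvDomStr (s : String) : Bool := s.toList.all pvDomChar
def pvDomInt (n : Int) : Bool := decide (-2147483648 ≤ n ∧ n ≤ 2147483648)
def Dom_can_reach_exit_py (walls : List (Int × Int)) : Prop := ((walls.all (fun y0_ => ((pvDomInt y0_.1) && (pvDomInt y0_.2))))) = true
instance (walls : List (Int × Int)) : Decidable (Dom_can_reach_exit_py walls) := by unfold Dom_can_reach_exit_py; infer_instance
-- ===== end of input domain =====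

-- B replaces A's FIFO-queue breadth-first loop by a recursive depth-first flood fill sharing one seen set; both return the same boolean (alternative decomposition, no speed claim).

-- ===== PORT A =====
-- shared module constants (_DELTAS, _START, _EXIT); both Pythons contain the identical _slide helper
def pvDeltas : List (String × (Int × Int)) := [("up", (0, -1)), ("down", (0, 1)), ("left", (-1, 0)), ("right", (1, 0))]
def pvActions : List String := pvDeltas.map Prod.fst
def pvStart : Int × Int := (1, 1)
def pvExit : Int × Int := (10, 10)

-- the 'while True' loop of _slide; fuel 16 exceeds the at most 12 iterations possible inside the 12×12 grid
def slideGo (walls : List (Int × Int)) (dx dy : Int) : Nat → Int × Int → Int × Int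
  | 0, p => p
  | f + 1, (x, y) =>
    if (x + dx, y + dy) ∈ walls ∨ ¬(0 ≤ x + dx ∧ x + dx < 12 ∧ 0 ≤ y + dy ∧ y + dy < 12) then (x, y)
    else if (x + dx, y + dy) = pvExit then (x + dx, y + dy)
    else slideGo walls dx dy f (x + dx, y + dy)

-- _slide; the _DELTAS[action] lookup is total here because every call site passes a key of pvDeltas
def slide (position : Int × Int) (action : String) (walls : List (Int × Int)) : Int × Int :=
  slideGo walls ((pvDeltas.lookup action).getD (0, 0)).1 ((pvDeltas.lookup action).getD (0, 0)).2 16 position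

-- the body of A's 'for action in _DELTAS' loop (appends unseen moved-to cells to queue and seen)
def bfsStep (walls : List (Int × Int)) (current : Int × Int)
    (qs : List (Int × Int) × PySem.Set (Int × Int)) : List (Int × Int) × PySem.Set (Int × Int) :=
  pvActions.foldl (fun qs action =>
    if slide current action walls ≠ current ∧ slide current action walls ∉ qs.2 then
      (qs.1 ++ [slide current action walls], PySem.Set.add qs.2 (slide current action walls))
    else qs) qs

-- A's 'while head < len(queue)' loop; fuel 150 exceeds the at most 145 possible iterations (≤ 144 distinct grid cells ever enter the queue)
def bfsLoop (walls : List (Int × Int)) : Nat → List (Int × Int) → PySem.Set (Int × Int) → Nat → Bool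
  | 0, _, _, _ => false
  | f + 1, queue, seen, head =>
    if head < queue.length then
      if queue.getD head (0, 0) = pvExit then true
      else
        bfsLoop walls f (bfsStep walls (queue.getD head (0, 0)) (queue, seen)).1
          (bfsStep walls (queue.getD head (0, 0)) (queue, seen)).2 (head + 1)
    else false

def can_reach_exit_py (walls : List (Int × Int)) : Bool :=
  bfsLoop walls 150 [pvStart] (PySem.Set.ofList [pvStart]) 0

-- ===== PORT B =====
-- B's recursive 'reach' closure; the shared mutable 'seen' set is threaded through as the second component.
-- Fuel 150 exceeds the maximal recursion depth (each recursive call has a strictly larger seen set, ≤ 144 grid cells).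
def dfsGo (walls : List (Int × Int)) : Nat → Int × Int → PySem.Set (Int × Int) → Bool × PySem.Set (Int × Int)
  | 0, _, seen => (false, seen)
  | f + 1, cell, seen =>
    if cell = pvExit then (true, seen)
    else
      pvActions.foldl (fun acc action =>
        if acc.1 then acc
        else
          if slide cell action walls ≠ cell ∧ slide cell action walls ∉ acc.2 then
            dfsGo walls f (slide cell action walls) (PySem.Set.add acc.2 (slide cell action walls))
          else acc) (false, seen)

def can_reach_exit_py_alt (walls : List (Int × Int)) : Bool :=
  (dfsGo walls 150 pvStart (PySem.Set.ofList [pvStart])).1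

-- ===== PRECONDITION & SPEC =====
def Spec_can_reach_exit_py (walls : List (Int × Int)) (out : Bool) : Prop := out = can_reach_exit_py_alt walls
instance (walls : List (Int × Int)) (out : Bool) : Decidable (Spec_can_reach_exit_py walls out) := by unfold Spec_can_reach_exit_py; infer_instance

-- ===== CLAIM (what is proved, stated in full; the proofs are below) =====
def Claim_equal_can_reach_exit_py : Prop := ∀ (walls : List (Int × Int)), Dom_can_reach_exit_py walls → Spec_can_reach_exit_py walls (can_reach_exit_py walls)

-- ===== LEMMAS AND PROOFS =====

-- membership in the 12×12 grid
def InGrid (p : Int × Int) : Prop := 0 ≤ p.1 ∧ p.1 < 12 ∧ 0 ≤ p.2 ∧ p.2 < 12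

-- one slide move, in any of the four directions
def stepR (walls : List (Int × Int)) (c d : Int × Int) : Prop := ∃ a ∈ pvActions, slide c a walls = d

-- cells reachable from the start by slide moves — the common semantics both traversals compute
def ReachesW (walls : List (Int × Int)) (x : Int × Int) : Prop :=
  Relation.ReflTransGen (stepR walls) pvStart x

lemma inGrid_start : InGrid pvStart := by norm_num [InGrid, pvStart]

lemma slideGo_grid (walls : List (Int × Int)) (dx dy : Int) :
    ∀ (f : Nat) (p : Int × Int), InGrid p → InGrid (slideGo walls dx dy f p) := by
  intro f
  induction f with
  | zero => intro p hp; simpa [slideGo] using hp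
  | succ f ih =>
    rintro ⟨x, y⟩ hp
    simp only [slideGo]
    split
    · exact hp
    · split
      · rename_i h _
        push Not at h
        exact ⟨h.2.1, h.2.2.1, h.2.2.2.1, h.2.2.2.2⟩
      · rename_i h _
        push Not at h
        exact ih (x + dx, y + dy) ⟨h.2.1, h.2.2.1, h.2.2.2.1, h.2.2.2.2⟩

lemma slide_grid (walls : List (Int × Int)) (p : Int × Int) (a : String) (hp : InGrid p) :
    InGrid (slide p a walls) :=
  slideGo_grid walls _ _ 16 p hp

noncomputable def gridF : Finset (Int × Int) := Finset.Icc (0 : Int) 11 ×ˢ Finset.Icc (0 : Int) 11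

lemma mem_gridF {p : Int × Int} : p ∈ gridF ↔ InGrid p := by
  cases p with
  | mk x y => simp only [gridF, Finset.mem_product, Finset.mem_Icc, InGrid]; omega

lemma card_gridF : gridF.card = 144 := by
  simp [gridF, Finset.card_product, Int.card_Icc]

lemma length_le_144 {s : List (Int × Int)} (hn : s.Nodup) (hg : ∀ x ∈ s, InGrid x) :
    s.length ≤ 144 := by
  have h1 : s.toFinset ⊆ gridF := fun x hx => mem_gridF.mpr (hg x (List.mem_toFinset.mp hx))
  have h2 := Finset.card_le_card h1
  rwa [List.toFinset_card_of_nodup hn, card_gridF] at h2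

-- a step-closed set containing the start contains every reachable cell
lemma reach_mem_closed {walls : List (Int × Int)} {Q : List (Int × Int)}
    (hc : ∀ x ∈ Q, ∀ a ∈ pvActions, slide x a walls ∈ Q ∨ slide x a walls = x)
    (h0 : pvStart ∈ Q) : ∀ x, ReachesW walls x → x ∈ Q := by
  intro x hx
  induction hx with
  | refl => exact h0
  | tail _ h2 ih =>
    obtain ⟨a, ha, hs⟩ := h2
    rcases hc _ ih a ha with h | h
    · rwa [hs] at h
    · rw [← hs, h]; exact ih

-- ---- BFS (port A) ----

-- the expand loop over a suffix of the actions: queue is only appended to, the new cells are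
-- slide moves of 'current', every move of 'current' (listed in l) ends up in the queue or equals
-- 'current', seen keeps exactly the queue's members, and nodup is preserved
lemma bfsStep_spec (walls : List (Int × Int)) (current : Int × Int) :
    ∀ (l : List String) (q s : List (Int × Int)), (∀ x, x ∈ s ↔ x ∈ q) →
      (∃ t, (l.foldl (fun qs action =>
          if slide current action walls ≠ current ∧ slide current action walls ∉ qs.2 then
            (qs.1 ++ [slide current action walls], PySem.Set.add qs.2 (slide current action walls))
          else qs) (q, s)).1 = q ++ t ∧
        ∀ x ∈ t, ∃ a ∈ l, slide current a walls = x) ∧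
      (∀ x, x ∈ (l.foldl (fun qs action =>
          if slide current action walls ≠ current ∧ slide current action walls ∉ qs.2 then
            (qs.1 ++ [slide current action walls], PySem.Set.add qs.2 (slide current action walls))
          else qs) (q, s)).2 ↔ x ∈ (l.foldl (fun qs action =>
          if slide current action walls ≠ current ∧ slide current action walls ∉ qs.2 then
            (qs.1 ++ [slide current action walls], PySem.Set.add qs.2 (slide current action walls))
          else qs) (q, s)).1) ∧
      (∀ a ∈ l, slide current a walls ∈ (l.foldl (fun qs action =>
          if slide current action walls ≠ current ∧ slide current action walls ∉ qs.2 then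
            (qs.1 ++ [slide current action walls], PySem.Set.add qs.2 (slide current action walls))
          else qs) (q, s)).1 ∨ slide current a walls = current) ∧
      (q.Nodup → (l.foldl (fun qs action =>
          if slide current action walls ≠ current ∧ slide current action walls ∉ qs.2 then
            (qs.1 ++ [slide current action walls], PySem.Set.add qs.2 (slide current action walls))
          else qs) (q, s)).1.Nodup) := by
  intro l
  induction l with
  | nil =>
    intro q s hsq
    exact ⟨⟨[], by simp, by simp⟩, fun x => (hsq x), by simp, fun h => h⟩
  | cons a l ih =>
    intro q s hsq
    simp only [List.foldl_cons]
    by_cases h : slide current a walls ≠ current ∧ slide current a walls ∉ s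
    · rw [if_pos h, PySem.Set.add_of_not_mem h.2]
      have hsq' : ∀ x, x ∈ s ++ [slide current a walls] ↔ x ∈ q ++ [slide current a walls] := by
        intro x
        simp only [List.mem_append, List.mem_singleton, hsq x]
      obtain ⟨⟨t, ht1, ht2⟩, hsq2, hcl, hnd2⟩ := ih (q ++ [slide current a walls]) (s ++ [slide current a walls]) hsq'
      refine ⟨⟨[slide current a walls] ++ t, by rw [ht1, List.append_assoc], ?_⟩, hsq2, ?_, ?_⟩
      · intro x hx
        rcases List.mem_append.mp hx with hx | hx
        · exact ⟨a, List.mem_cons_self, (List.mem_singleton.mp hx).symm⟩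
        · obtain ⟨a', ha', hs'⟩ := ht2 x hx
          exact ⟨a', List.mem_cons_of_mem _ ha', hs'⟩
      · intro a' ha'
        rcases List.mem_cons.mp ha' with ha' | ha'
        · subst ha'
          left
          rw [ht1]
          simp
        · exact hcl a' ha'
      · intro hq
        apply hnd2
        have hnotq : slide current a walls ∉ q := fun hmem => h.2 ((hsq _).mpr hmem)
        simp only [List.nodup_append, List.nodup_singleton, true_and, hq]
        intro x hx b hb heq
        apply hnotq
        rw [List.mem_singleton.mp hb] at heq
        exact heq ▸ hx
    · rw [if_neg h]
      obtain ⟨⟨t, ht1, ht2⟩, hsq2, hcl, hnd2⟩ := ih q s hsq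
      refine ⟨⟨t, ht1, fun x hx => ?_⟩, hsq2, ?_, hnd2⟩
      · obtain ⟨a', ha', hs'⟩ := ht2 x hx
        exact ⟨a', List.mem_cons_of_mem _ ha', hs'⟩
      intro a' ha'
      rcases List.mem_cons.mp ha' with ha' | ha'
      · subst ha'
        rcases Decidable.not_and_iff_not_or_not.mp h with h1 | h2
        · right
          exact Decidable.not_not.mp h1
        · left
          rw [ht1]
          exact List.mem_append.mpr (Or.inl ((hsq _).mp (Decidable.not_not.mp h2)))
      · exact hcl a' ha'

-- the BFS loop invariant: seen = queue as sets, queue nodup, all entries are grid cells and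
-- reachable, the processed prefix is fully expanded and none of it is the exit, and there is
-- enough fuel left; under it the loop answers exactly "is the exit reachable"
lemma bfs_main (walls : List (Int × Int)) :
    ∀ (f : Nat) (q s : List (Int × Int)) (head : Nat),
      (∀ x, x ∈ s ↔ x ∈ q) → q.Nodup → (∀ x ∈ q, InGrid x) → pvStart ∈ q →
      head ≤ q.length →
      (∀ i, i < head → ∀ a ∈ pvActions,
        slide (q.getD i (0, 0)) a walls ∈ q ∨ slide (q.getD i (0, 0)) a walls = q.getD i (0, 0)) →
      (∀ i, i < head → q.getD i (0, 0) ≠ pvExit) →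
      (∀ x ∈ q, ReachesW walls x) →
      145 ≤ f + head →
      (bfsLoop walls f q s head = true ↔ ReachesW walls pvExit) := by
  intro f
  induction f with
  | zero =>
    intro q s head hsq hnd hg hst hhead hproc hne hr hf
    have h144 := length_le_144 hnd hg
    exact absurd hf (by omega)
  | succ f ih =>
    intro q s head hsq hnd hg hst hhead hproc hne hr hf
    by_cases hlt : head < q.length
    · have hcur_mem : q.getD head (0, 0) ∈ q := by
        rw [List.getD_eq_getElem _ _ hlt]
        exact List.getElem_mem _
      by_cases hex : q.getD head (0, 0) = pvExit
      · simp only [bfsLoop, if_pos hlt, if_pos hex]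
        simpa using hex ▸ hr _ hcur_mem
      · simp only [bfsLoop, if_pos hlt, if_neg hex]
        obtain ⟨⟨t, ht1, ht2⟩, hsq2, hcl, hnd2⟩ :=
          bfsStep_spec walls (q.getD head (0, 0)) pvActions q s hsq
        have hstep1 : (bfsStep walls (q.getD head (0, 0)) (q, s)).1 = q ++ t := ht1
        have hlen : (bfsStep walls (q.getD head (0, 0)) (q, s)).1.length = q.length + t.length := by
          rw [hstep1, List.length_append]
        have hgetD : ∀ i, i < q.length →
            (bfsStep walls (q.getD head (0, 0)) (q, s)).1.getD i (0, 0) = q.getD i (0, 0) := by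
          intro i hi
          rw [hstep1]
          exact List.getD_append _ _ _ _ hi
        have hg' : ∀ x ∈ (bfsStep walls (q.getD head (0, 0)) (q, s)).1, InGrid x := by
          intro x hx
          rw [hstep1] at hx
          rcases List.mem_append.mp hx with hx | hx
          · exact hg x hx
          · obtain ⟨a, _, hs'⟩ := ht2 x hx
            exact hs' ▸ slide_grid walls _ a (hg _ hcur_mem)
        have hst' : pvStart ∈ (bfsStep walls (q.getD head (0, 0)) (q, s)).1 := by
          rw [hstep1]; exact List.mem_append.mpr (Or.inl hst)
        have hproc' : ∀ i, i < head + 1 → ∀ a ∈ pvActions,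
            slide ((bfsStep walls (q.getD head (0, 0)) (q, s)).1.getD i (0, 0)) a walls
              ∈ (bfsStep walls (q.getD head (0, 0)) (q, s)).1 ∨
            slide ((bfsStep walls (q.getD head (0, 0)) (q, s)).1.getD i (0, 0)) a walls
              = (bfsStep walls (q.getD head (0, 0)) (q, s)).1.getD i (0, 0) := by
          intro i hi a ha
          rcases Nat.lt_succ_iff_lt_or_eq.mp hi with hi' | hi'
          · rw [hgetD i (by omega)]
            rcases hproc i hi' a ha with hm | hm
            · left; rw [hstep1]; exact List.mem_append.mpr (Or.inl hm)
            · right; exact hm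
          · subst hi'
            rw [hgetD i hlt]
            exact hcl a ha
        have hne' : ∀ i, i < head + 1 →
            (bfsStep walls (q.getD head (0, 0)) (q, s)).1.getD i (0, 0) ≠ pvExit := by
          intro i hi
          rcases Nat.lt_succ_iff_lt_or_eq.mp hi with hi' | hi'
          · rw [hgetD i (by omega)]; exact hne i hi'
          · subst hi'; rw [hgetD i hlt]; exact hex
        have hr' : ∀ x ∈ (bfsStep walls (q.getD head (0, 0)) (q, s)).1, ReachesW walls x := by
          intro x hx
          rw [hstep1] at hx
          rcases List.mem_append.mp hx with hx | hx
          · exact hr x hx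
          · obtain ⟨a, ha, hs'⟩ := ht2 x hx
            exact Relation.ReflTransGen.tail (hr _ hcur_mem) ⟨a, ha, hs'⟩
        exact ih _ _ _ hsq2 (hnd2 hnd) hg' hst' (by omega) hproc' hne' hr' (by omega)
    · simp only [bfsLoop, if_neg hlt, Bool.false_eq_true, false_iff]
      intro hR
      have hclosed : ∀ x ∈ q, ∀ a ∈ pvActions, slide x a walls ∈ q ∨ slide x a walls = x := by
        intro x hx a ha
        obtain ⟨i, hi, hqi⟩ := List.mem_iff_getElem.mp hx
        have hgd : q.getD i (0, 0) = x := by rw [List.getD_eq_getElem _ _ hi]; exact hqi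
        have := hproc i (by omega) a ha
        rwa [hgd] at this
      obtain ⟨j, hj, hqj⟩ := List.mem_iff_getElem.mp (reach_mem_closed hclosed hst pvExit hR)
      exact hne j (by omega) (by rw [List.getD_eq_getElem _ _ hj]; exact hqj)

lemma A_iff (walls : List (Int × Int)) :
    can_reach_exit_py walls = true ↔ ReachesW walls pvExit := by
  unfold can_reach_exit_py
  apply bfs_main
  · intro x; simp [PySem.Set.mem_ofList]
  · simp
  · intro x hx
    rw [List.mem_singleton.mp hx]
    exact inGrid_start
  · simp
  · simp
  · intro i hi; omega
  · intro i hi; omega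
  · intro x hx
    rw [List.mem_singleton.mp hx]
    exact Relation.ReflTransGen.refl
  · omega

-- ---- DFS (port B) ----

-- what one finished call (or fold over remaining actions l) of the DFS guarantees, relative to the
-- seen set s it started from: seen only grows, stays nodup/grid/reachable, a true answer certifies
-- reachability, and a false answer certifies that every listed move of c and every move of a newly
-- seen cell lands back in the final seen set (and the exit was never added)
def dfsP (walls : List (Int × Int)) (c : Int × Int) (l : List String) (s : List (Int × Int))
    (r : Bool × List (Int × Int)) : Prop :=
  (∃ t, r.2 = s ++ t) ∧ r.2.Nodup ∧ (∀ x ∈ r.2, InGrid x) ∧ (∀ x ∈ r.2, ReachesW walls x) ∧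
  (r.1 = true → ReachesW walls pvExit) ∧
  (r.1 = false →
    (pvExit ∉ s → pvExit ∉ r.2) ∧
    (∀ a ∈ l, slide c a walls ∈ r.2 ∨ slide c a walls = c) ∧
    (∀ d ∈ r.2, d ∉ s → ∀ a ∈ pvActions, slide d a walls ∈ r.2 ∨ slide d a walls = d))

lemma dfs_exit (walls : List (Int × Int)) (f : Nat) (s : PySem.Set (Int × Int)) (hf : 1 ≤ f) :
    dfsGo walls f pvExit s = (true, s) := by
  cases f with
  | zero => omega
  | succ f => simp [dfsGo]

lemma dfs_fold_skip (walls : List (Int × Int)) (f : Nat) (cell : Int × Int) :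
    ∀ (l : List String) (s : PySem.Set (Int × Int)),
      (l.foldl (fun acc action =>
        if acc.1 then acc
        else
          if slide cell action walls ≠ cell ∧ slide cell action walls ∉ acc.2 then
            dfsGo walls f (slide cell action walls) (PySem.Set.add acc.2 (slide cell action walls))
          else acc) (true, s)) = (true, s) := by
  intro l
  induction l with
  | nil => intro s; rfl
  | cons a l ih => intro s; simpa using ih s

-- the 'for action in _DELTAS' fold of B's reach over a suffix l of the actions, given the
-- specification of the recursive calls at fuel f as hypothesis IH
lemma dfs_fold (walls : List (Int × Int)) (f : Nat) (c : Int × Int)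
    (IH : ∀ (c' : Int × Int) (s' : List (Int × Int)), c' ∈ s' → s'.Nodup →
      (∀ x ∈ s', InGrid x) → (∀ x ∈ s', ReachesW walls x) → 145 ≤ f + s'.length →
      dfsP walls c' pvActions s' (dfsGo walls f c' s')) :
    ∀ (l : List String), (∀ a ∈ l, a ∈ pvActions) →
    ∀ (s0 : List (Int × Int)), c ∈ s0 → s0.Nodup → (∀ x ∈ s0, InGrid x) →
      (∀ x ∈ s0, ReachesW walls x) → 145 ≤ f + 1 + s0.length →
      dfsP walls c l s0 (l.foldl (fun acc action =>
        if acc.1 then acc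
        else
          if slide c action walls ≠ c ∧ slide c action walls ∉ acc.2 then
            dfsGo walls f (slide c action walls) (PySem.Set.add acc.2 (slide c action walls))
          else acc) (false, s0)) := by
  intro l
  induction l with
  | nil =>
    intro _ s0 hc hnd hg hr _
    simp only [List.foldl_nil]
    exact ⟨⟨[], by simp⟩, hnd, hg, hr, fun h => absurd h (by simp),
      fun _ => ⟨fun h => h, fun a ha => absurd ha (by simp), fun d hd hdn _ _ => absurd hd hdn⟩⟩
  | cons a l ihl =>
    intro hl s0 hc hnd hg hr hf
    simp only [List.foldl_cons]
    rw [if_neg (by simp : ¬((false, s0).1 = true))]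
    by_cases hcond : slide c a walls ≠ c ∧ slide c a walls ∉ (false, s0).2
    · rw [if_pos hcond]
      have hnotmem : slide c a walls ∉ s0 := hcond.2
      rw [PySem.Set.add_of_not_mem hnotmem]
      have hc' : slide c a walls ∈ s0 ++ [slide c a walls] := by simp
      have hnd' : (s0 ++ [slide c a walls]).Nodup := by
        simp only [List.nodup_append, List.nodup_singleton, true_and, hnd]
        intro x hx b hb heq
        apply hnotmem
        rw [List.mem_singleton.mp hb] at heq
        exact heq ▸ hx
      have hg' : ∀ x ∈ s0 ++ [slide c a walls], InGrid x := by
        intro x hx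
        rcases List.mem_append.mp hx with hx | hx
        · exact hg x hx
        · rw [List.mem_singleton.mp hx]
          exact slide_grid walls _ a (hg c hc)
      have hr' : ∀ x ∈ s0 ++ [slide c a walls], ReachesW walls x := by
        intro x hx
        rcases List.mem_append.mp hx with hx | hx
        · exact hr x hx
        · rw [List.mem_singleton.mp hx]
          exact Relation.ReflTransGen.tail (hr c hc) ⟨a, hl a List.mem_cons_self, rfl⟩
      have hf' : 145 ≤ f + (s0 ++ [slide c a walls]).length := by
        simp only [List.length_append, List.length_singleton]
        omega
      have HD := IH (slide c a walls) (s0 ++ [slide c a walls]) hc' hnd' hg' hr' hf'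
      rcases hEq : dfsGo walls f (slide c a walls) (s0 ++ [slide c a walls]) with ⟨b1, s1⟩
      rw [hEq] at HD
      obtain ⟨⟨t1, ht1⟩, hnd1, hg1, hr1, htrue1, hfalse1⟩ := HD
      simp only at ht1 hnd1 hg1 hr1 htrue1 hfalse1
      cases b1 with
      | true =>
        rw [dfs_fold_skip]
        exact ⟨⟨[slide c a walls] ++ t1, by rw [ht1, List.append_assoc]⟩, hnd1, hg1, hr1,
          fun _ => htrue1 rfl, fun h => absurd h (by simp)⟩
      | false =>
        have hcs1 : c ∈ s1 := by rw [ht1]; simp [hc]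
        have hf1 : 145 ≤ f + 1 + s1.length := by
          rw [ht1]
          simp only [List.length_append, List.length_singleton]
          omega
        have HF := ihl (fun a' ha' => hl a' (List.mem_cons_of_mem _ ha')) s1 hcs1 hnd1 hg1 hr1 hf1
        obtain ⟨⟨t2, ht2⟩, hnd2, hg2, hr2, htrue2, hfalse2⟩ := HF
        have hs1sub : ∀ x ∈ s1, x ∈ (l.foldl (fun acc action =>
            if acc.1 then acc
            else
              if slide c action walls ≠ c ∧ slide c action walls ∉ acc.2 then
                dfsGo walls f (slide c action walls) (PySem.Set.add acc.2 (slide c action walls))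
              else acc) (false, s1)).2 := by
          rw [ht2]
          intro x hx
          exact List.mem_append.mpr (Or.inl hx)
        refine ⟨⟨[slide c a walls] ++ t1 ++ t2, ?_⟩, hnd2, hg2, hr2, htrue2, ?_⟩
        · rw [ht2, ht1]
          simp [List.append_assoc]
        · intro hfeq
          obtain ⟨hE2, hcl2, hexp2⟩ := hfalse2 hfeq
          obtain ⟨hE1, hcl1, hexp1⟩ := hfalse1 rfl
          have hnxtE : slide c a walls ≠ pvExit := by
            intro heq
            have hfone : 1 ≤ f := by
              have h144 := length_le_144 hnd' hg'
              omega
            rw [heq, dfs_exit walls f _ hfone] at hEq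
            exact nomatch (congrArg Prod.fst hEq)
          refine ⟨?_, ?_, ?_⟩
          · intro hE0
            apply hE2
            apply hE1
            intro hmem
            rcases List.mem_append.mp hmem with h | h
            · exact hE0 h
            · exact hnxtE (List.mem_singleton.mp h).symm
          · intro a' ha'
            rcases List.mem_cons.mp ha' with ha' | ha'
            · subst ha'
              left
              exact hs1sub _ (by rw [ht1]; simp)
            · exact hcl2 a' ha'
          · intro d hd hdn a' ha'
            by_cases hd1 : d ∈ s1
            · by_cases hd0 : d ∈ s0 ++ [slide c a walls]
              · have hdx : d = slide c a walls := by
                  rcases List.mem_append.mp hd0 with h | h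
                  · exact absurd h hdn
                  · exact List.mem_singleton.mp h
                subst hdx
                rcases hcl1 a' ha' with hm | hm
                · left; exact hs1sub _ hm
                · right; exact hm
              · rcases hexp1 d hd1 hd0 a' ha' with hm | hm
                · left; exact hs1sub _ hm
                · right; exact hm
            · exact hexp2 d hd hd1 a' ha'
    · rw [if_neg hcond]
      have HF := ihl (fun a' ha' => hl a' (List.mem_cons_of_mem _ ha')) s0 hc hnd hg hr hf
      obtain ⟨⟨t2, ht2⟩, hnd2, hg2, hr2, htrue2, hfalse2⟩ := HF
      refine ⟨⟨t2, ht2⟩, hnd2, hg2, hr2, htrue2, ?_⟩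
      intro hfeq
      obtain ⟨hE2, hcl2, hexp2⟩ := hfalse2 hfeq
      refine ⟨hE2, ?_, hexp2⟩
      intro a' ha'
      rcases List.mem_cons.mp ha' with ha' | ha'
      · subst ha'
        rcases Decidable.not_and_iff_not_or_not.mp hcond with h1 | h2
        · right
          exact Decidable.not_not.mp h1
        · left
          rw [ht2]
          exact List.mem_append.mpr (Or.inl (Decidable.not_not.mp h2))
      · exact hcl2 a' ha'

lemma dfs_main (walls : List (Int × Int)) :
    ∀ (f : Nat) (c : Int × Int) (s : List (Int × Int)),
      c ∈ s → s.Nodup → (∀ x ∈ s, InGrid x) → (∀ x ∈ s, ReachesW walls x) →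
      145 ≤ f + s.length →
      dfsP walls c pvActions s (dfsGo walls f c s) := by
  intro f
  induction f with
  | zero =>
    intro c s _ hnd hg _ hf
    have h144 := length_le_144 hnd hg
    exact absurd hf (by omega)
  | succ f ih =>
    intro c s hc hnd hg hr hf
    by_cases hex : c = pvExit
    · subst hex
      simp only [dfsGo]
      exact ⟨⟨[], by simp⟩, hnd, hg, hr, fun _ => hr _ hc, fun h => absurd h (by simp)⟩
    · simp only [dfsGo, if_neg hex]
      exact dfs_fold walls f c ih pvActions (fun _ ha => ha) s hc hnd hg hr hf

lemma B_iff (walls : List (Int × Int)) :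
    can_reach_exit_py_alt walls = true ↔ ReachesW walls pvExit := by
  unfold can_reach_exit_py_alt
  have hof : PySem.Set.ofList [pvStart] = [pvStart] := rfl
  rw [hof]
  have HD := dfs_main walls 150 pvStart [pvStart] (by simp) (by simp)
    (fun x hx => (List.mem_singleton.mp hx) ▸ inGrid_start)
    (fun x hx => (List.mem_singleton.mp hx) ▸ Relation.ReflTransGen.refl)
    (by simp)
  obtain ⟨⟨t, ht⟩, _, _, _, htrue, hfalse⟩ := HD
  constructor
  · exact htrue
  · intro hR
    by_contra hb
    have hb' : (dfsGo walls 150 pvStart [pvStart]).1 = false := by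
      cases h : (dfsGo walls 150 pvStart [pvStart]).1
      · rfl
      · exact absurd h hb
    obtain ⟨hE, hcl, hexp⟩ := hfalse hb'
    have hclosed : ∀ x ∈ (dfsGo walls 150 pvStart [pvStart]).2, ∀ a ∈ pvActions,
        slide x a walls ∈ (dfsGo walls 150 pvStart [pvStart]).2 ∨ slide x a walls = x := by
      intro x hx a ha
      by_cases hxs : x ∈ [pvStart]
      · rw [List.mem_singleton.mp hxs]
        exact hcl a ha
      · exact hexp x hx hxs a ha
    have hstart : pvStart ∈ (dfsGo walls 150 pvStart [pvStart]).2 := by rw [ht]; simp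
    have hmem := reach_mem_closed hclosed hstart pvExit hR
    exact hE (by decide) hmem


-- ===== VERDICT (by name: the statement is the Claim_ definition above) =====
theorem can_reach_exit_py_spec : Claim_equal_can_reach_exit_py := by
  intro walls _
  unfold Spec_can_reach_exit_py
  have h := (A_iff walls).trans (B_iff walls).symm
  cases hA : can_reach_exit_py walls <;> cases hB : can_reach_exit_py_alt walls <;> simp_all
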